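-- pv_equiv track=rewrite | github.com/dprochazka/advent-of-code | 2023/14/parabolic_reflector_dish.py | parabolic_reflector_dish
-- ===== SOURCE A (Python) =====
-- def parabolic_reflector_dish(lines):
--     load = 0
--     for col in zip(*lines):
--         s = -1  # location of current square rock or stopped round rock
--         for i, c in enumerate(col):
--             if c == "#":
--                 s = i
--                 continue
--             if c == ".":
--                 continue
--             if c == "O":
--                 s += 1
--                 load += len(col) - s
--     return load
-- ===== SOURCE B (Python) =====
-- def parabolic_reflector_dish(lines):
--     height = len(lines)
--     # tilt north: in each '#'-delimited segment of a column the 'O's pack to the top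
--     settled = []
--     for col in ("".join(c) for c in zip(*lines)):
--         segs = col.split("#")
--         settled.append(
--             "#".join(
--                 "O" * seg.count("O") + "." * (len(seg) - seg.count("O"))
--                 for seg in segs
--             )
--         )
--     # measure the load on the settled grid
--     load = 0
--     for col in settled:
--         for i, c in enumerate(col):
--             if c == "O":
--                 load += height - i
--     return load
-- ===== Notes on version B (the rewrite author's own statement) =====
-- stated objective: alternative
-- what changed: A computes the load in a single stateful scan per column (tracking the last stop position); B instead materialises the settled grid -- each column is split on '#', every segment rebuilt with its 'O' count packed at the top -- and then measures the load in a separate pass over the settled columns.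
import Mathlib
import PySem

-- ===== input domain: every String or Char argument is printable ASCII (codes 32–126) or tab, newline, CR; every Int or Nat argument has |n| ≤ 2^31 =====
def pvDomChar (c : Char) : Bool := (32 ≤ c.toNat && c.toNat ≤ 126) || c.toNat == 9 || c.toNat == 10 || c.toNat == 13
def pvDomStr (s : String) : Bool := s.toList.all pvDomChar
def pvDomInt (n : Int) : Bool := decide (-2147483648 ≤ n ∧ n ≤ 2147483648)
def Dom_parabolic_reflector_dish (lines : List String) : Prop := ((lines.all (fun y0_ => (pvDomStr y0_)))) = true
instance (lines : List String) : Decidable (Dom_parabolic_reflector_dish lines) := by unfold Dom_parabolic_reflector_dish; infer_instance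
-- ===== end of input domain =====

-- ===== PORT A =====
-- B changes the decomposition: A computes the load in one stateful scan per column; B first
-- builds the settled (tilted) grid by splitting each column on '#' and packing the 'O's,
-- then measures the load in a separate pass (objective: alternative decomposition, same cost).

-- Shared column extraction. A's zip(*lines) and Source B's
-- "".join(line[j] for line in lines) for j in range(min((len(line) for line in lines), default=0))
-- compute exactly these columns: zip truncates to the shortest line; the getD default is never
-- used since j < every row length.
def pvCols (lines : List String) : List (List Char) :=
  match lines with
  | [] => []
  | l :: ls =>
    let rows := (l :: ls).map String.toList
    let w := ls.foldl (fun m s => min m s.toList.length) l.toList.length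
    (List.range w).map (fun j => rows.map (fun r => r.getD j ' '))

def parabolic_reflector_dish (lines : List String) : Int :=
  (pvCols lines).foldl
    (fun load col =>
      ((PySem.List.enumerate col 0).foldl
        (fun (st : Int × Int) ic =>
          if ic.2 = '#' then (ic.1, st.2)
          else if ic.2 = '.' then st
          else if ic.2 = 'O' then (st.1 + 1, st.2 + (col.length : Int) - (st.1 + 1))
          else st)
        (-1, load)).2)
    0

-- ===== PORT B =====
-- 'O' * seg.count('O') + '.' * (len(seg) - seg.count('O'))  (str.count of a 1-char needle is the char count)
def pvTiltSeg (seg : List Char) : List Char :=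
  List.replicate (seg.count 'O') 'O' ++ List.replicate (seg.length - seg.count 'O') '.'

-- "#".join(tilted segments of col.split("#"))
def pvTiltCol (col : List Char) : List Char :=
  PySem.Chars.join ['#'] ((PySem.Chars.splitOn col ['#']).map pvTiltSeg)

def parabolic_reflector_dish_alt (lines : List String) : Int :=
  let height : Int := lines.length
  let settled := (pvCols lines).map pvTiltCol
  settled.foldl
    (fun load col =>
      (PySem.List.enumerate col 0).foldl
        (fun load ic => if ic.2 = 'O' then load + height - ic.1 else load) load)
    0

-- ===== PRECONDITION & SPEC =====
def Spec_parabolic_reflector_dish (lines : List String) (out : Int) : Prop := out = parabolic_reflector_dish_alt lines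
instance (lines : List String) (out : Int) : Decidable (Spec_parabolic_reflector_dish lines out) := by unfold Spec_parabolic_reflector_dish; infer_instance

-- ===== CLAIM (what is proved, stated in full; the proofs are below) =====
def Claim_equal_parabolic_reflector_dish : Prop := ∀ (lines : List String), Dom_parabolic_reflector_dish lines → Spec_parabolic_reflector_dish lines (parabolic_reflector_dish lines)

-- ===== LEMMAS AND PROOFS =====

-- A's per-column scan, as a structural recursion (i = row index, s = last stop position)
def gA (n : Int) : List Char → Int → Int → Int
  | [], _, _ => 0
  | c :: xs, i, s =>
    if c = '#' then gA n xs (i + 1) i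
    else if c = '.' then gA n xs (i + 1) s
    else if c = 'O' then (n - (s + 1)) + gA n xs (i + 1) (s + 1)
    else gA n xs (i + 1) s

-- B's load measurement, as a structural recursion
def hB (n : Int) : List Char → Int → Int
  | [], _ => 0
  | c :: ys, i => if c = 'O' then (n - i) + hB n ys (i + 1) else hB n ys (i + 1)

-- (n - a) + (n - (a + 1)) + ... , k terms
def sumL (n a : Int) : Nat → Int
  | 0 => 0
  | k + 1 => (n - a) + sumL n (a + 1) k

-- clean recursion computing col.split('#')
def splitAux : List Char → List Char → List (List Char)
  | [], cur => [cur.reverse]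
  | c :: rest, cur => if c = '#' then cur.reverse :: splitAux rest [] else splitAux rest (c :: cur)

theorem go_eq_splitAux : ∀ (fuel : Nat) (l cur : List Char) (acc : List (List Char)),
    l.length < fuel →
    PySem.Chars.splitOn.go ['#'] fuel l cur acc = acc.reverse ++ splitAux l cur := by
  intro fuel
  induction fuel with
  | zero => intro l cur acc h; omega
  | succ f ih =>
    intro l cur acc h
    cases l with
    | nil => simp [PySem.Chars.splitOn.go, splitAux]
    | cons c rest =>
      by_cases hc : c = '#'
      · subst hc
        simp only [PySem.Chars.splitOn.go, List.isPrefixOf] at *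
        rw [ih]
        · simp [splitAux]
        · simpa using Nat.lt_of_succ_lt_succ h
      · have hp : List.isPrefixOf ['#'] (c :: rest) = false := by
          simp [List.isPrefixOf]
          exact fun h' => hc h'.symm
        simp only [PySem.Chars.splitOn.go, hp]
        rw [show splitAux (c :: rest) cur = splitAux rest (c :: cur) by simp [splitAux, hc]]
        exact ih _ _ _ (by simpa using Nat.lt_of_succ_lt_succ h)

theorem splitOn_eq_splitAux (l : List Char) : PySem.Chars.splitOn l ['#'] = splitAux l [] := by
  rw [PySem.Chars.splitOn, go_eq_splitAux _ _ _ _ (by omega)]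
  simp

theorem splitAux_ne_nil (l cur : List Char) : splitAux l cur ≠ [] := by
  induction l generalizing cur with
  | nil => simp [splitAux]
  | cons c rest ih =>
    by_cases hc : c = '#' <;> simp [splitAux, hc, ih]

theorem join_splitAux (l : List Char) : ∀ cur, PySem.Chars.join ['#'] (splitAux l cur) = cur.reverse ++ l := by
  induction l with
  | nil => intro cur; simp [splitAux, PySem.Chars.join, List.intercalate]
  | cons c rest ih =>
    intro cur
    by_cases hc : c = '#'
    · subst hc
      rw [show splitAux ('#' :: rest) cur = cur.reverse :: splitAux rest [] by simp [splitAux]]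
      rcases hne : splitAux rest [] with _ | ⟨y, t⟩
      · exact absurd hne (splitAux_ne_nil rest [])
      · rw [PySem.Chars.join_cons_cons]
        have := ih []
        rw [hne] at this
        simp only [List.reverse_nil, List.nil_append] at this
        rw [this]
        simp
    · rw [show splitAux (c :: rest) cur = splitAux rest (c :: cur) by simp [splitAux, hc]]
      rw [ih (c :: cur)]
      simp

theorem splitAux_no_hash (l : List Char) : ∀ cur, ('#' : Char) ∉ cur →
    ∀ seg ∈ splitAux l cur, ('#' : Char) ∉ seg := by
  induction l with
  | nil =>
    intro cur h seg hs
    rw [show splitAux [] cur = [cur.reverse] from rfl] at hs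
    simp only [List.mem_singleton] at hs
    subst hs
    simpa using h
  | cons c rest ih =>
    intro cur h seg hs
    by_cases hc : c = '#'
    · subst hc
      rw [show splitAux ('#' :: rest) cur = cur.reverse :: splitAux rest [] by simp [splitAux]] at hs
      rw [List.mem_cons] at hs
      rcases hs with hs | hs
      · subst hs; simpa using h
      · exact ih [] (by simp) seg hs
    · rw [show splitAux (c :: rest) cur = splitAux rest (c :: cur) by simp [splitAux, hc]] at hs
      refine ih (c :: cur) ?_ seg hs
      simp [h]
      exact fun h' => hc h'.symm

theorem length_tiltSeg (seg : List Char) : (pvTiltSeg seg).length = seg.length := by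
  have := List.count_le_length (l := seg) (a := 'O')
  simp [pvTiltSeg]
  omega

theorem hB_append (n : Int) (ys zs : List Char) : ∀ i, hB n (ys ++ zs) i = hB n ys i + hB n zs (i + ys.length) := by
  induction ys with
  | nil => intro i; simp [hB]
  | cons c ys ih =>
    intro i
    by_cases hc : c = 'O' <;>
      simp only [List.cons_append, hB, hc, if_pos, List.length_cons] <;>
      rw [ih (i + 1)] <;> push_cast <;> ring

theorem hB_repl_O (n : Int) : ∀ (k : Nat) (i : Int), hB n (List.replicate k 'O') i = sumL n i k := by
  intro k
  induction k with
  | zero => intro i; simp [hB, sumL]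
  | succ k ih => intro i; simp [List.replicate_succ, hB, sumL, ih]

theorem hB_repl_dot (n : Int) : ∀ (m : Nat) (i : Int), hB n (List.replicate m '.') i = 0 := by
  intro m
  induction m with
  | zero => intro i; simp [hB]
  | succ m ih => intro i; simpa [List.replicate_succ, hB] using ih (i + 1)

theorem hB_tiltSeg (n : Int) (seg : List Char) (i : Int) : hB n (pvTiltSeg seg) i = sumL n i (seg.count 'O') := by
  rw [pvTiltSeg, hB_append, hB_repl_O, hB_repl_dot, add_zero]

theorem gA_seg (n : Int) (seg : List Char) (hseg : ('#' : Char) ∉ seg) :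
    ∀ (rest : List Char) (i s : Int),
      gA n (seg ++ rest) i s = sumL n (s + 1) (seg.count 'O') + gA n rest (i + seg.length) (s + seg.count 'O') := by
  induction seg with
  | nil => intro rest i s; simp [sumL, gA]
  | cons c seg ih =>
    intro rest i s
    have hc : c ≠ '#' := fun h => hseg (h ▸ List.mem_cons_self)
    have hseg' : ('#' : Char) ∉ seg := fun h => hseg (List.mem_cons_of_mem _ h)
    by_cases ho : c = 'O'
    · subst ho
      simp only [List.cons_append, gA, if_neg hc, if_neg (by decide : ¬('O' : Char) = '.'), if_pos rfl]
      rw [ih hseg' rest (i + 1) (s + 1)]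
      simp only [List.count_cons_self, List.length_cons, sumL]
      push_cast
      ring
    · by_cases hd : c = '.'
      · subst hd
        simp only [List.cons_append, gA, if_neg hc, if_pos rfl]
        rw [ih hseg' rest (i + 1) s]
        rw [List.count_cons_of_ne (by simpa using ho)]
        simp only [List.length_cons]
        push_cast
        ring_nf
      · simp only [List.cons_append, gA, if_neg hc, if_neg hd, if_neg ho]
        rw [ih hseg' rest (i + 1) s]
        rw [List.count_cons_of_ne (by simpa using ho)]
        simp only [List.length_cons]
        push_cast
        ring_nf

theorem master_segs (n : Int) : ∀ (segs : List (List Char)), (∀ seg ∈ segs, ('#' : Char) ∉ seg) →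
    ∀ i : Int, gA n (PySem.Chars.join ['#'] segs) i (i - 1)
      = hB n (PySem.Chars.join ['#'] (segs.map pvTiltSeg)) i := by
  intro segs
  induction segs with
  | nil => intro _ i; simp [PySem.Chars.join_nil, gA, hB]
  | cons seg rest ih =>
    intro hno i
    have hseg : ('#' : Char) ∉ seg := hno seg (List.mem_cons_self)
    cases rest with
    | nil =>
      rw [List.map_singleton, PySem.Chars.join_singleton, PySem.Chars.join_singleton]
      have := gA_seg n seg hseg [] i (i - 1)
      simp only [List.append_nil, gA, add_zero] at this
      rw [this, hB_tiltSeg]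
      norm_num
    | cons seg2 rest2 =>
      rw [PySem.Chars.join_cons_cons, List.map_cons, List.map_cons, PySem.Chars.join_cons_cons]
      rw [List.append_assoc, List.append_assoc, List.singleton_append, List.singleton_append]
      rw [gA_seg n seg hseg _ i (i - 1)]
      rw [show gA n ('#' :: PySem.Chars.join ['#'] (seg2 :: rest2)) (i + seg.length) (i - 1 + seg.count 'O')
            = gA n (PySem.Chars.join ['#'] (seg2 :: rest2)) (i + seg.length + 1) (i + seg.length) from by
        simp [gA]]
      have hrec := ih (fun s hs => hno s (List.mem_cons_of_mem _ hs)) (i + (seg.length : Int) + 1)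
      rw [show (i + (seg.length : Int) + 1) - 1 = i + seg.length from by ring] at hrec
      rw [List.map_cons] at hrec
      rw [hrec]
      rw [hB_append, hB_tiltSeg]
      rw [show hB n ('#' :: PySem.Chars.join ['#'] (pvTiltSeg seg2 :: List.map pvTiltSeg rest2)) (i + (pvTiltSeg seg).length)
            = hB n (PySem.Chars.join ['#'] (pvTiltSeg seg2 :: List.map pvTiltSeg rest2)) (i + (pvTiltSeg seg).length + 1) from by
        simp [hB]]
      rw [length_tiltSeg]
      norm_num

theorem master_col (n : Int) (col : List Char) : gA n col 0 (-1) = hB n (pvTiltCol col) 0 := by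
  have h := master_segs n (splitAux col []) (splitAux_no_hash col [] (by simp)) 0
  rw [join_splitAux col []] at h
  rw [pvTiltCol, splitOn_eq_splitAux]
  simpa using h

theorem foldA_eq (n : Int) (xs : List Char) : ∀ (i s load : Int),
    ((PySem.List.enumerate xs i).foldl
        (fun (st : Int × Int) ic =>
          if ic.2 = '#' then (ic.1, st.2)
          else if ic.2 = '.' then st
          else if ic.2 = 'O' then (st.1 + 1, st.2 + n - (st.1 + 1))
          else st)
        (s, load)).2 = load + gA n xs i s := by
  induction xs with
  | nil => intro i s load; simp [PySem.List.enumerate_nil, gA]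
  | cons c xs ih =>
    intro i s load
    rw [PySem.List.enumerate_cons, List.foldl_cons]
    by_cases h1 : c = '#'
    · subst h1; simp [gA, ih]
    · by_cases h2 : c = '.'
      · subst h2; simp [gA, ih]
      · by_cases h3 : c = 'O'
        · subst h3; simp [gA, ih]; ring_nf
        · simp [gA, ih, h1, h2, h3]

theorem foldB_eq (n : Int) (ys : List Char) : ∀ (i load : Int),
    (PySem.List.enumerate ys i).foldl
        (fun load ic => if ic.2 = 'O' then load + n - ic.1 else load) load
      = load + hB n ys i := by
  induction ys with
  | nil => intro i load; simp [PySem.List.enumerate_nil, hB]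
  | cons c ys ih =>
    intro i load
    rw [PySem.List.enumerate_cons, List.foldl_cons]
    by_cases h : c = 'O'
    · subst h; simp [hB, ih]; ring_nf
    · simp [hB, ih, h]

theorem cols_length (lines : List String) : ∀ col ∈ pvCols lines, col.length = lines.length := by
  intro col hc
  cases lines with
  | nil => simp [pvCols] at hc
  | cons l ls =>
    simp only [pvCols, List.mem_map] at hc
    obtain ⟨j, _, rfl⟩ := hc
    simp

-- ===== VERDICT (by name: the statement is the Claim_ definition above) =====
theorem parabolic_reflector_dish_spec : Claim_equal_parabolic_reflector_dish := by
  intro lines _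
  show parabolic_reflector_dish lines = parabolic_reflector_dish_alt lines
  unfold parabolic_reflector_dish parabolic_reflector_dish_alt
  simp only [List.foldl_map]
  refine Eq.trans
    (PySem.List.foldl_congr_mem _ _ (fun load col => load + gA (lines.length : Int) col 0 (-1)) 0 ?_)
    (Eq.symm (PySem.List.foldl_congr_mem _ _ (fun load col => load + gA (lines.length : Int) col 0 (-1)) 0 ?_))
  · intro acc col hc
    rw [foldA_eq, cols_length lines col hc]
  · intro acc col hc
    rw [foldB_eq]
    show acc + hB (lines.length : Int) (pvTiltCol col) 0 = acc + gA (lines.length : Int) col 0 (-1)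
    rw [master_col]
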